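-- pv_equiv track=rewrite | github.com/krimeano/aoc-2023 | days/day05/solution.py | unify_maps
-- ===== SOURCE A (Python) =====
-- MapItem = tuple[int, int, int]
--
-- Segment = tuple[int, int]
--
-- SegmentMap = dict[Segment: MapItem]
--
-- def map_to_segments(xxx: list[MapItem], ix: int) -> SegmentMap:
--     return {(xx[ix], xx[ix] + xx[2]): xx for xx in xxx}
--
-- def split_segment(this: Segment, other_dots: list[int]) -> list[Segment]:
--     (x0, x1) = this
--     yy = [y for y in other_dots if x0 < y < x1]
--     if not len(yy):
--         return []
--     y = yy.pop(0)
--     return (split_segment((x0, y), yy) or [(x0, y)]) + (split_segment((y, x1), yy) or [(y, x1)])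
--
-- def split_segments(this: SegmentMap, other: SegmentMap) -> SegmentMap:
--     other_dots = sorted(set([yy[0] for yy in other] + [yy[1] for yy in other]))
--     zzz: SegmentMap = {}
--     for xx in this:
--         item = this[xx]
--         chunks = split_segment(xx, other_dots)
--         if not chunks:
--             zzz[xx] = item
--         else:
--             for zz in chunks:
--                 shift = zz[0] - xx[0]
--                 width = zz[1] - zz[0]
--                 zzz[zz] = (item[0] + shift, item[1] + shift, width)
--     return zzz
--
-- def unify_maps(xxx: list[MapItem], yyy: list[MapItem]) -> list[MapItem]:
--     if not xxx:
--         return yyy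
--
--     images = map_to_segments(xxx, 0)
--     reals = map_to_segments(yyy, 1)
--     images = split_segments(images, reals)
--     reals = split_segments(reals, images)
--
--     zzz = []
--
--     for xx in images:
--         if xx in reals:
--             zzz.append((reals[xx][0], images[xx][1], images[xx][2]))
--         else:
--             zzz.append(images[xx])
--
--     for xx in reals:
--         if xx not in images:
--             zzz.append(reals[xx])
--     return zzz
-- ===== SOURCE B (Python) =====
-- def unify_maps(xxx, yyy):
--     if not xxx:
--         return yyy
--
--     def first_greater(dots, x):
--         # first index i with dots[i] > x (dots sorted ascending)
--         lo, hi = 0, len(dots)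
--         while lo < hi:
--             mid = (lo + hi) // 2
--             if dots[mid] > x:
--                 hi = mid
--             else:
--                 lo = mid + 1
--         return lo
--
--     def split_all(segmap, dots):
--         out = {}
--         for (x0, x1), (a, b, w) in segmap.items():
--             inner = []
--             for d in dots[first_greater(dots, x0):]:
--                 if d >= x1:
--                     break
--                 inner.append(d)
--             if not inner:
--                 out[(x0, x1)] = (a, b, w)
--             else:
--                 prev = x0
--                 for d in inner + [x1]:
--                     out[(prev, d)] = (a + prev - x0, b + prev - x0, d - prev)
--                     prev = d
--         return out
--
--     images = {(x[0], x[0] + x[2]): x for x in xxx}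
--     reals = {(y[1], y[1] + y[2]): y for y in yyy}
--
--     dots_r = sorted({e for seg in reals for e in seg})
--     images = split_all(images, dots_r)
--     dots_i = sorted({e for seg in images for e in seg})
--     reals = split_all(reals, dots_i)
--
--     result = []
--     for seg, (a, b, w) in images.items():
--         r = reals.get(seg)
--         result.append((r[0], b, w) if r is not None else (a, b, w))
--     for seg, item in reals.items():
--         if seg not in images:
--             result.append(item)
--     return result
-- ===== Notes on version B (the rewrite author's own statement) =====
-- stated objective: faster
-- what changed: Replaces A's divide-and-conquer split_segment (which re-filters the dot list at every recursion level) by a hand-rolled binary search for the first interior dot followed by one linear walk that emits the sub-segments directly.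
import Mathlib
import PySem

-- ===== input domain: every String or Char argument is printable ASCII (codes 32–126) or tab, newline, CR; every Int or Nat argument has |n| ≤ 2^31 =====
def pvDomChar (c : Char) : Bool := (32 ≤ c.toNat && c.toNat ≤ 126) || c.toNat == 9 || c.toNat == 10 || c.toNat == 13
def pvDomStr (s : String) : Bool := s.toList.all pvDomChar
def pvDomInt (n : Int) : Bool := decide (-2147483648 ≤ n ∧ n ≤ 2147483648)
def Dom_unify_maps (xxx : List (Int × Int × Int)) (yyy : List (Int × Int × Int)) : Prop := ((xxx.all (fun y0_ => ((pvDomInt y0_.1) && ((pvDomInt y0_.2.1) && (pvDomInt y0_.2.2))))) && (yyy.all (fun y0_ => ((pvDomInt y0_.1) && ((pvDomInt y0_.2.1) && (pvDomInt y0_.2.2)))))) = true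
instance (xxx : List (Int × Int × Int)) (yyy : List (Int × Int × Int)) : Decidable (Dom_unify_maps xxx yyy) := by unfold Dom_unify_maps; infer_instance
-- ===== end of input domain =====

-- B replaces A's recursive re-filtering split of each segment by one binary search plus a linear walk; measured faster.


-- ===== PORT A =====
-- xx[ix] on a 3-tuple; exact for ix ∈ {0, 1, 2} (A only uses 0 and 1 here, and xx[2] literally)
def pyIdx3 (xx : Int × Int × Int) (ix : Int) : Int :=
  if ix == 0 then xx.1 else if ix == 1 then xx.2.1 else xx.2.2

def map_to_segments (xxx : List (Int × Int × Int)) (ix : Int) : PySem.Dict (Int × Int) (Int × Int × Int) :=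
  xxx.foldl (fun d xx => d.insert (pyIdx3 xx ix, pyIdx3 xx ix + xx.2.2) xx) PySem.Dict.empty

def split_segment (this : Int × Int) (other_dots : List Int) : List (Int × Int) :=
  -- yy = [y for y in other_dots if x0 < y < x1]; y = yy.pop(0) makes the recursive calls take yy's tail
  match h : other_dots.filter (fun y => decide (this.1 < y) && decide (y < this.2)) with
  | [] => []
  | y :: rest =>
    let left := split_segment (this.1, y) rest
    let right := split_segment (y, this.2) rest
    (if left = [] then [(this.1, y)] else left) ++ (if right = [] then [(y, this.2)] else right)
termination_by other_dots.length
decreasing_by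
  · have hle := List.length_filter_le (fun y => decide (this.1 < y) && decide (y < this.2)) other_dots
    rw [h] at hle; simp only [List.length_cons] at hle; omega
  · have hle := List.length_filter_le (fun y => decide (this.1 < y) && decide (y < this.2)) other_dots
    rw [h] at hle; simp only [List.length_cons] at hle; omega

def split_segments (this other : PySem.Dict (Int × Int) (Int × Int × Int)) :
    PySem.Dict (Int × Int) (Int × Int × Int) :=
  let other_dots := PySem.List.sorted
    (PySem.Set.ofList ((PySem.Dict.keys other).map (·.1) ++ (PySem.Dict.keys other).map (·.2)))
    (fun x => x) false
  -- 'for xx in this: item = this[xx]' iterates the entries in order; keys are unique so this[xx] is the entry's value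
  (PySem.Dict.items this).foldl (fun zzz p =>
    let xx := p.1
    let item := p.2
    let chunks := split_segment xx other_dots
    if chunks = [] then zzz.insert xx item
    else chunks.foldl (fun z zz =>
      z.insert zz (item.1 + (zz.1 - xx.1), item.2.1 + (zz.1 - xx.1), zz.2 - zz.1)) zzz)
    PySem.Dict.empty

def unify_maps (xxx : List (Int × Int × Int)) (yyy : List (Int × Int × Int)) : List (Int × Int × Int) :=
  if xxx = [] then yyy
  else
    let images := map_to_segments xxx 0
    let reals := map_to_segments yyy 1
    let images := split_segments images reals
    let reals := split_segments reals images
    let zzz := (PySem.Dict.items images).foldl (fun zzz p =>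
      match PySem.Dict.get? reals p.1 with
      | some r => zzz ++ [(r.1, p.2.2.1, p.2.2.2)]
      | none => zzz ++ [p.2]) []
    (PySem.Dict.items reals).foldl (fun zzz p =>
      if PySem.Dict.contains images p.1 then zzz else zzz ++ [p.2]) zzz

-- ===== PORT B =====
-- first index i with dots[i] > x, binary search (dots sorted ascending); dots[mid] is always in range
def first_greater_aux (dots : List Int) (x : Int) (lo hi : Int) : Int :=
  if hlt : lo < hi then
    let mid := PySem.Int.floordiv (lo + hi) 2
    if PySem.List.pyGetD dots mid 0 > x then first_greater_aux dots x lo mid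
    else first_greater_aux dots x (mid + 1) hi
  else lo
termination_by (hi - lo).toNat
decreasing_by
  · have h := PySem.Int.floordiv_two_mid_bounds (le_of_lt hlt)
    have h2 : PySem.Int.floordiv (lo + hi) 2 < hi := by
      rw [PySem.Int.floordiv_lt_iff_lt_mul (by omega)]; omega
    omega
  · have h := PySem.Int.floordiv_two_mid_bounds (le_of_lt hlt)
    omega

def first_greater (dots : List Int) (x : Int) : Int :=
  first_greater_aux dots x 0 (dots.length : Int)

-- 'for d in dots[i:]: if d >= x1: break; inner.append(d)'
def collect_below (x1 : Int) : List Int → List Int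
  | [] => []
  | d :: t => if d ≥ x1 then [] else d :: collect_below x1 t

-- 'prev = x0; for d in inner + [x1]: out[(prev, d)] = (a + prev - x0, b + prev - x0, d - prev); prev = d'
def chain_insert (x0 a b : Int) (out : PySem.Dict (Int × Int) (Int × Int × Int)) (prev : Int) :
    List Int → PySem.Dict (Int × Int) (Int × Int × Int)
  | [] => out
  | d :: t => chain_insert x0 a b (out.insert (prev, d) (a + (prev - x0), b + (prev - x0), d - prev)) d t

def split_all (segmap : PySem.Dict (Int × Int) (Int × Int × Int)) (dots : List Int) :
    PySem.Dict (Int × Int) (Int × Int × Int) :=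
  (PySem.Dict.items segmap).foldl (fun out p =>
    let x0 := p.1.1
    let x1 := p.1.2
    let inner := collect_below x1 (PySem.List.slice dots (some (first_greater dots x0)) none)
    if inner = [] then out.insert (x0, x1) (p.2.1, p.2.2.1, p.2.2.2)
    else chain_insert x0 p.2.1 p.2.2.1 out x0 (inner ++ [x1]))
    PySem.Dict.empty

def unify_maps_alt (xxx : List (Int × Int × Int)) (yyy : List (Int × Int × Int)) : List (Int × Int × Int) :=
  if xxx = [] then yyy
  else
    let images := xxx.foldl (fun d x => d.insert (x.1, x.1 + x.2.2) x) PySem.Dict.empty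
    let reals := yyy.foldl (fun d y => d.insert (y.2.1, y.2.1 + y.2.2) y) PySem.Dict.empty
    let dots_r := PySem.List.sorted
      (PySem.Set.ofList ((PySem.Dict.keys reals).flatMap (fun s => [s.1, s.2]))) (fun x => x) false
    let images := split_all images dots_r
    let dots_i := PySem.List.sorted
      (PySem.Set.ofList ((PySem.Dict.keys images).flatMap (fun s => [s.1, s.2]))) (fun x => x) false
    let reals := split_all reals dots_i
    let res := (PySem.Dict.items images).foldl (fun res p =>
      match PySem.Dict.get? reals p.1 with
      | some r => res ++ [(r.1, p.2.2.1, p.2.2.2)]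
      | none => res ++ [p.2]) []
    (PySem.Dict.items reals).foldl (fun res p =>
      if PySem.Dict.contains images p.1 then res else res ++ [p.2]) res

-- ===== PRECONDITION & SPEC =====
def Spec_unify_maps (xxx : List (Int × Int × Int)) (yyy : List (Int × Int × Int)) (out : List (Int × Int × Int)) : Prop := out = unify_maps_alt xxx yyy
instance (xxx : List (Int × Int × Int)) (yyy : List (Int × Int × Int)) (out : List (Int × Int × Int)) : Decidable (Spec_unify_maps xxx yyy out) := by unfold Spec_unify_maps; infer_instance

-- ===== CLAIM (what is proved, stated in full; the proofs are below) =====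
def Claim_equal_unify_maps : Prop := ∀ (xxx : List (Int × Int × Int)) (yyy : List (Int × Int × Int)), Dom_unify_maps xxx yyy → Spec_unify_maps xxx yyy (unify_maps xxx yyy)

-- ===== LEMMAS AND PROOFS =====

-- the list of consecutive sub-segments of (x0, x1) cut at the interior dots ds
def chain : Int → List Int → Int → List (Int × Int)
  | x0, [], x1 => [(x0, x1)]
  | x0, d :: t, x1 => (x0, d) :: chain d t x1

def chunksOf (x0 x1 : Int) (ds : List Int) : List (Int × Int) :=
  match ds with
  | [] => []
  | y :: rest => (x0, y) :: chain y rest x1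

-- A's split_segment on a strictly increasing dot list produces exactly the chain of its interior dots
theorem split_segment_sorted_aux : ∀ (n : Nat) (dots : List Int), dots.length ≤ n →
    dots.Pairwise (· < ·) → ∀ (x0 x1 : Int),
    split_segment (x0, x1) dots =
      chunksOf x0 x1 (dots.filter (fun y => decide (x0 < y) && decide (y < x1))) := by
  intro n
  induction n with
  | zero =>
    intro dots hlen _ x0 x1
    have : dots = [] := List.eq_nil_of_length_eq_zero (Nat.le_zero.mp hlen)
    subst this
    rw [split_segment]
    simp [chunksOf]
  | succ n ih =>
    intro dots hlen hp x0 x1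
    rw [split_segment]
    rcases hf : dots.filter (fun y => decide (x0 < y) && decide (y < x1)) with _ | ⟨y, rest⟩
    · simp [chunksOf]
    · simp only
      have hpf : (dots.filter (fun y => decide (x0 < y) && decide (y < x1))).Pairwise (· < ·) :=
        hp.filter _
      rw [hf] at hpf
      have hyrest : ∀ z ∈ rest, y < z := (List.pairwise_cons.mp hpf).1
      have hprest : rest.Pairwise (· < ·) := (List.pairwise_cons.mp hpf).2
      have hmem : ∀ z ∈ rest, x0 < z ∧ z < x1 := by
        intro z hz
        have : z ∈ dots.filter (fun y => decide (x0 < y) && decide (y < x1)) := by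
          rw [hf]; exact List.mem_cons_of_mem _ hz
        have := List.of_mem_filter this
        simpa using this
      have hrlen : rest.length ≤ n := by
        have h1 := List.length_filter_le (fun y => decide (x0 < y) && decide (y < x1)) dots
        rw [hf] at h1
        simp only [List.length_cons] at h1
        omega
      have hleft : split_segment (x0, y) rest = [] := by
        rw [ih rest hrlen hprest x0 y]
        have : rest.filter (fun z => decide (x0 < z) && decide (z < y)) = [] := by
          rw [List.filter_eq_nil_iff]
          intro z hz
          have := hyrest z hz
          simp
          omega
        rw [this]
        rfl
      have hright : split_segment (y, x1) rest = chunksOf y x1 rest := by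
        rw [ih rest hrlen hprest y x1]
        have : rest.filter (fun z => decide (y < z) && decide (z < x1)) = rest := by
          rw [List.filter_eq_self]
          intro z hz
          have h1 := hyrest z hz
          have h2 := (hmem z hz).2
          simp
          omega
        rw [this]
      rw [hleft, hright]
      clear hf hpf hyrest hprest hmem hrlen hleft hright ih hlen hp
      cases rest with
      | nil => simp [chunksOf, chain]
      | cons y' rest' => simp [chunksOf, chain]

-- binary-search invariant for first_greater_aux
theorem fga_spec : ∀ (k : Nat) (dots : List Int) (x : Int), dots.Pairwise (· < ·) →
    ∀ (lo hi : Int), (hi - lo).toNat ≤ k →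
    0 ≤ lo → lo ≤ hi → hi ≤ (dots.length : Int) →
    (∀ (i : Nat) (h : i < dots.length), (i : Int) < lo → dots[i] ≤ x) →
    (∀ (i : Nat) (h : i < dots.length), hi ≤ (i : Int) → x < dots[i]) →
    0 ≤ first_greater_aux dots x lo hi ∧ first_greater_aux dots x lo hi ≤ (dots.length : Int) ∧
    (∀ (i : Nat) (h : i < dots.length), (i : Int) < first_greater_aux dots x lo hi → dots[i] ≤ x) ∧
    (∀ (i : Nat) (h : i < dots.length), first_greater_aux dots x lo hi ≤ (i : Int) → x < dots[i]) := by
  intro k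
  induction k with
  | zero =>
    intro dots x hp lo hi hk h0 hlohi hhi hlow hhigh
    have hle : hi ≤ lo := by omega
    rw [first_greater_aux]
    have : ¬ lo < hi := by omega
    rw [dif_neg this]
    refine ⟨h0, by omega, hlow, fun i h hi' => hhigh i h (by omega)⟩
  | succ k ih =>
    intro dots x hp lo hi hk h0 hlohi hhi hlow hhigh
    rw [first_greater_aux]
    by_cases hlt : lo < hi
    · rw [dif_pos hlt]
      have hmid := PySem.Int.floordiv_two_mid_bounds (le_of_lt hlt)
      have hmidlt : PySem.Int.floordiv (lo + hi) 2 < hi := by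
        rw [PySem.Int.floordiv_lt_iff_lt_mul (by omega)]; omega
      set mid := PySem.Int.floordiv (lo + hi) 2 with hmiddef
      have hmid0 : 0 ≤ mid := by omega
      have hmidlen : mid.toNat < dots.length := by omega
      have hget : PySem.List.pyGetD dots mid 0 = dots[mid.toNat] :=
        PySem.List.pyGetD_eq_getElem dots 0 hmid0 (by omega)
      have hmono := List.pairwise_iff_getElem.mp hp
      by_cases hcmp : PySem.List.pyGetD dots mid 0 > x
      · rw [if_pos hcmp]
        rw [hget] at hcmp
        refine ih dots x hp lo mid (by omega) h0 (by omega) (by omega) hlow ?_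
        intro i h hi'
        rcases Nat.lt_or_ge mid.toNat i with hgt | hge
        · exact lt_trans hcmp (hmono mid.toNat i (by omega) h hgt)
        · have : i = mid.toNat := by omega
          subst this; exact hcmp
      · rw [if_neg hcmp]
        rw [hget] at hcmp
        rw [not_lt] at hcmp
        refine ih dots x hp (mid + 1) hi (by omega) (by omega) (by omega) hhi ?_ hhigh
        intro i h hi'
        rcases Nat.lt_or_ge i mid.toNat with hlt' | hge
        · exact le_of_lt (lt_of_lt_of_le (hmono i mid.toNat h (by omega) hlt') hcmp)
        · have : i = mid.toNat := by omega
          subst this; exact hcmp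
    · rw [dif_neg hlt]
      refine ⟨h0, by omega, hlow, fun i h hi' => hhigh i h (by omega)⟩

-- a filter whose predicate is false exactly before position r is a drop
theorem filter_eq_drop (p : Int → Bool) : ∀ (l : List Int) (r : Nat), r ≤ l.length →
    (∀ (i : Nat) (h : i < l.length), i < r → p l[i] = false) →
    (∀ (i : Nat) (h : i < l.length), r ≤ i → p l[i] = true) →
    l.filter p = l.drop r := by
  intro l
  induction l with
  | nil => intro r _ _ _; simp
  | cons a t ih =>
    intro r hr hlow hhigh
    cases r with
    | zero =>
      rw [List.drop_zero, List.filter_eq_self]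
      intro z hz
      rcases List.mem_iff_getElem.mp hz with ⟨i, h, rfl⟩
      exact hhigh i h (Nat.zero_le i)
    | succ r' =>
      have ha : p a = false := hlow 0 (by simp) (Nat.succ_pos r')
      rw [List.drop_succ_cons, List.filter_cons_of_neg (by simp [ha])]
      refine ih r' (by simpa using hr) ?_ ?_
      · intro i h hi'
        have := hlow (i + 1) (by simpa using Nat.succ_lt_succ h) (Nat.succ_lt_succ hi')
        simpa using this
      · intro i h hi'
        have := hhigh (i + 1) (by simpa using Nat.succ_lt_succ h) (Nat.succ_le_succ hi')
        simpa using this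

-- the break loop on a strictly increasing list collects exactly the elements below x1
theorem collect_below_sorted (x1 : Int) : ∀ (m : List Int), m.Pairwise (· < ·) →
    collect_below x1 m = m.filter (fun d => decide (d < x1)) := by
  intro m
  induction m with
  | nil => intro _; rfl
  | cons d t ih =>
    intro hp
    have hdt := (List.pairwise_cons.mp hp).1
    have hpt := (List.pairwise_cons.mp hp).2
    by_cases hd : d ≥ x1
    · rw [collect_below, if_pos hd]
      have h1 : (decide (d < x1)) = false := by simp; omega
      rw [List.filter_cons_of_neg (by simp [h1])]
      have : t.filter (fun d => decide (d < x1)) = [] := by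
        rw [List.filter_eq_nil_iff]
        intro z hz
        have := hdt z hz
        simp
        omega
      rw [this]
    · rw [collect_below, if_neg hd]
      rw [List.filter_cons_of_pos (by simp; omega), ih hpt]

-- B's interior-dot computation equals A's filter
theorem inner_eq (dots : List Int) (hp : dots.Pairwise (· < ·)) (x0 x1 : Int) :
    collect_below x1 (PySem.List.slice dots (some (first_greater dots x0)) none)
      = dots.filter (fun y => decide (x0 < y) && decide (y < x1)) := by
  have hspec : 0 ≤ first_greater dots x0 ∧ first_greater dots x0 ≤ (dots.length : Int) ∧
      (∀ (i : Nat) (h : i < dots.length), (i : Int) < first_greater dots x0 → dots[i] ≤ x0) ∧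
      (∀ (i : Nat) (h : i < dots.length), first_greater dots x0 ≤ (i : Int) → x0 < dots[i]) := by
    unfold first_greater
    exact fga_spec dots.length dots x0 hp 0 (dots.length : Int) (by omega) le_rfl
      (by omega) le_rfl (by intro i h hi'; omega) (by intro i h hi'; exact absurd h (by omega))
  obtain ⟨h0, hlen, hlow, hhigh⟩ := hspec
  rw [PySem.List.slice_from dots h0]
  have hdropPW : (dots.drop (first_greater dots x0).toNat).Pairwise (· < ·) :=
    hp.sublist (List.drop_sublist _ _)
  rw [collect_below_sorted x1 _ hdropPW]
  have hdrop : dots.filter (fun y => decide (x0 < y)) = dots.drop (first_greater dots x0).toNat := by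
    refine filter_eq_drop _ dots (first_greater dots x0).toNat (by omega) ?_ ?_
    · intro i h hi'
      have := hlow i h (by omega)
      simp
      omega
    · intro i h hi'
      have := hhigh i h (by omega)
      simp
      omega
  rw [← hdrop, List.filter_filter]
  apply List.filter_congr
  intro y _
  rw [Bool.and_comm]

-- A's insert loop over the chain is B's chain_insert walk
theorem chain_foldl (x0 a b x1 : Int) : ∀ (ds : List Int) (prev : Int)
    (z : PySem.Dict (Int × Int) (Int × Int × Int)),
    (chain prev ds x1).foldl (fun z zz =>
        z.insert zz (a + (zz.1 - x0), b + (zz.1 - x0), zz.2 - zz.1)) z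
      = chain_insert x0 a b z prev (ds ++ [x1]) := by
  intro ds
  induction ds with
  | nil => intro prev z; rfl
  | cons d t ih =>
    intro prev z
    rw [chain]
    simp only [List.foldl_cons, List.cons_append, chain_insert]
    exact ih d _

-- per-entry loop bodies of split_segments and split_all agree on a strictly increasing dot list
theorem body_eq (dots : List Int) (hp : dots.Pairwise (· < ·))
    (z : PySem.Dict (Int × Int) (Int × Int × Int)) (p : (Int × Int) × (Int × Int × Int)) :
    (let xx := p.1
     let item := p.2
     let chunks := split_segment xx dots
     if chunks = [] then z.insert xx item
     else chunks.foldl (fun z zz =>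
       z.insert zz (item.1 + (zz.1 - xx.1), item.2.1 + (zz.1 - xx.1), zz.2 - zz.1)) z)
    = (let x0 := p.1.1
       let x1 := p.1.2
       let inner := collect_below x1 (PySem.List.slice dots (some (first_greater dots x0)) none)
       if inner = [] then z.insert (x0, x1) (p.2.1, p.2.2.1, p.2.2.2)
       else chain_insert x0 p.2.1 p.2.2.1 z x0 (inner ++ [x1])) := by
  simp only
  rw [inner_eq dots hp p.1.1 p.1.2]
  have hsplit : split_segment p.1 dots =
      chunksOf p.1.1 p.1.2 (dots.filter (fun y => decide (p.1.1 < y) && decide (y < p.1.2))) :=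
    split_segment_sorted_aux dots.length dots le_rfl hp p.1.1 p.1.2
  rcases hf : dots.filter (fun y => decide (p.1.1 < y) && decide (y < p.1.2)) with _ | ⟨y, rest⟩
  · rw [hf] at hsplit
    rw [hsplit]
    simp [chunksOf]
  · rw [hf] at hsplit
    rw [hsplit]
    simp only [chunksOf]
    rw [if_neg (by simp), if_neg (by simp)]
    have hc : (p.1.1, y) :: chain y rest p.1.2 = chain p.1.1 (y :: rest) p.1.2 := rfl
    rw [hc, chain_foldl p.1.1 p.2.1 p.2.2.1 p.1.2 (y :: rest) p.1.1 z]

theorem split_eq (this other : PySem.Dict (Int × Int) (Int × Int × Int)) :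
    split_segments this other =
      split_all this (PySem.List.sorted
        (PySem.Set.ofList ((PySem.Dict.keys other).flatMap (fun s => [s.1, s.2])))
        (fun x => x) false) := by
  have dots_eq :
      PySem.List.sorted
        (PySem.Set.ofList ((PySem.Dict.keys other).map (·.1) ++ (PySem.Dict.keys other).map (·.2)))
        (fun x => x) false
      = PySem.List.sorted
        (PySem.Set.ofList ((PySem.Dict.keys other).flatMap (fun s => [s.1, s.2]))) (fun x => x) false := by
    apply PySem.List.sorted_eq_sorted_of_perm _ _ _ (fun a b h => h)
    rw [List.perm_ext_iff_of_nodup (PySem.Set.nodup_ofList _) (PySem.Set.nodup_ofList _)]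
    intro a
    rw [PySem.Set.mem_ofList, PySem.Set.mem_ofList]
    simp only [List.mem_append, List.mem_map, List.mem_flatMap, List.mem_cons,
      List.not_mem_nil, or_false]
    constructor
    · rintro (⟨t, ht, rfl⟩ | ⟨t, ht, rfl⟩)
      · exact ⟨t, ht, Or.inl rfl⟩
      · exact ⟨t, ht, Or.inr rfl⟩
    · rintro ⟨t, ht, rfl | rfl⟩
      · exact Or.inl ⟨t, ht, rfl⟩
      · exact Or.inr ⟨t, ht, rfl⟩
  unfold split_segments split_all
  rw [dots_eq]
  set dots := PySem.List.sorted
    (PySem.Set.ofList ((PySem.Dict.keys other).flatMap (fun s => [s.1, s.2]))) (fun x => x) false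
    with hdots
  have hp : dots.Pairwise (· < ·) := PySem.List.sorted_ofList_pairwise_lt _
  exact congrArg (fun f => List.foldl f PySem.Dict.empty (PySem.Dict.items this))
    (funext fun z => funext fun p => body_eq dots hp z p)

-- ===== VERDICT (by name: the statement is the Claim_ definition above) =====
theorem unify_maps_spec : Claim_equal_unify_maps := by
  intro xxx yyy _
  unfold Spec_unify_maps
  have map0_eq : map_to_segments xxx 0 =
      xxx.foldl (fun d x => d.insert (x.1, x.1 + x.2.2) x) PySem.Dict.empty := by
    unfold map_to_segments
    rfl
  have map1_eq : map_to_segments yyy 1 =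
      yyy.foldl (fun d y => d.insert (y.2.1, y.2.1 + y.2.2) y) PySem.Dict.empty := by
    unfold map_to_segments
    rfl
  unfold unify_maps unify_maps_alt
  split_ifs with hx
  · rfl
  · simp only [map0_eq, map1_eq, split_eq]
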